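-- pv_equiv track=rewrite | github.com/SedatCeyhan/Algorithms_Solutions | Dynamic Programming/minimumDeleteSum.py | deletion_distance
-- ===== SOURCE A (Python) =====
-- def deletion_distance(s1, s2):
--     n, m = len(s1), len(s2)
--
--     # If one of the strings is empty, then the distance is basically the length of
--     # the other string
--     if n == 0: return m
--     if m == 0: return n
--
--     # Initialize dynamic programming array
--     # dp[i][j] will hold the minimum char deletion length required to make str1[1:i] and str2[1:j] equal
--     dp = [[0] * (m + 1) for i in range(n + 1)]
--
--     # Base cases: if one of the strings is empty, then the minimum char deletion length
--     # is the length of the non-empty string, e.g., "" and str2[1:j] ====> min length is j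
--     for i in range(1, m + 1):
--         dp[0][i] = i
--
--     for i in range(1, n + 1):
--         dp[i][0] = i
--
--     # Recurrence
--     for i in range(1, n + 1):
--         for j in range(1, m + 1):
--             if s1[i - 1] == s2[j - 1]:
--                 dp[i][j] = dp[i - 1][j - 1]
--
--             else:
--                 dp[i][j] = min((2 + dp[i - 1][j - 1]),
--                                (1 + dp[i - 1][j]),
--                                (1 + dp[i][j - 1]))
--
--     return dp[n][m]
-- ===== SOURCE B (Python) =====
-- def deletion_distance(s1, s2):
--     # LCS with one rolling row (zip of the row with its own tail and s2),
--     # then delete everything outside the common subsequence.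
--     prev = [0] * (len(s2) + 1)
--     for c in s1:
--         cur = [0]
--         for c2, (pd, up) in zip(s2, zip(prev, prev[1:])):
--             cur.append(pd + 1 if c == c2 else max(up, cur[-1]))
--         prev = cur
--     return len(s1) + len(s2) - 2 * prev[-1]
-- ===== Notes on version B (the rewrite author's own statement) =====
-- stated objective: simpler
-- what changed: B computes the LCS with a max-recurrence over one rolling O(m) row (folding over s2 zipped with the row and its tail) and returns n+m-2*LCS, instead of A's full (n+1)x(m+1) min-cost deletion table with base-case loops and guards.
import Mathlib
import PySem

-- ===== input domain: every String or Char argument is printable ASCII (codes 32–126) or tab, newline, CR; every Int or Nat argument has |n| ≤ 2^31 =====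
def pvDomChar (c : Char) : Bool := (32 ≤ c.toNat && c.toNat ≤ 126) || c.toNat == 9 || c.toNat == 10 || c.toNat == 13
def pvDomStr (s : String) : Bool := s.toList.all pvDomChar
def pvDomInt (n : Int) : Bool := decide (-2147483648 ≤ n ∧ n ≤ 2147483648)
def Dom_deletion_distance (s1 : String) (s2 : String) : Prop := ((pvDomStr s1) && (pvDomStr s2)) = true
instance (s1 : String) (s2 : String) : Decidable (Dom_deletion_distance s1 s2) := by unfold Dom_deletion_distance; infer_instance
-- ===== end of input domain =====

-- B replaces A's min-cost deletion DP table by an LCS computed on one rolling row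
-- (a fold over s2 zipped with the row and its tail) and the identity n+m-2*LCS
-- (simpler, O(m) space); return values are proved equal.

-- ===== PORT A =====
-- A's row i of the dp table, built left to right: `left` = dp[i][j-1], the prev row
-- supplies dp[i-1][j-1] (head) and dp[i-1][j] (second element).
def nextRowA (c : Char) : Int → List Int → List Char → List Int
  | left, pd :: up :: rest, c2 :: cs =>
      let v := if c = c2 then pd else min (2 + pd) (min (1 + up) (1 + left))
      v :: nextRowA c v (up :: rest) cs
  | _, _, _ => []

-- the outer loop over i = 1..n; each row starts with its base case dp[i][0] = i
def rowsA : List Int → Int → List Char → List Char → List Int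
  | prev, _, [], _ => prev
  | prev, i, c :: cs, t => rowsA ((i + 1) :: nextRowA c (i + 1) prev t) (i + 1) cs t

def deletion_distance (s1 : String) (s2 : String) : Int :=
  let n : Int := s1.toList.length
  let m : Int := s2.toList.length
  if n = 0 then m
  else if m = 0 then n
  else
    -- dp[0] = [0,1,...,m] (the first base-case loop), then the nested recurrence;
    -- the answer is dp[n][m], the last entry of the last row
    (rowsA ((List.range (s2.toList.length + 1)).map Int.ofNat) 0 s1.toList s2.toList).getLastD 0

-- ===== PORT B =====
-- Source B's inner loop over zip(s2, zip(prev, prev[1:])): cur.append is transliterated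
-- as cons onto the reversed accumulator (exact), so cur[-1] is the head
def stepB (c : Char) (t : List Char) (prev : List Int) : List Int :=
  ((t.zip (prev.zip prev.tail)).foldl
    (fun cur p => (if c = p.1 then p.2.1 + 1 else max p.2.2 (cur.headD 0)) :: cur)
    [0]).reverse

def deletion_distance_alt (s1 : String) (s2 : String) : Int :=
  let final := s1.toList.foldl (fun prev c => stepB c s2.toList prev)
    (List.replicate (s2.toList.length + 1) 0)
  (s1.toList.length : Int) + s2.toList.length - 2 * final.getLastD 0

-- ===== PRECONDITION & SPEC =====
def Spec_deletion_distance (s1 : String) (s2 : String) (out : Int) : Prop := out = deletion_distance_alt s1 s2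
instance (s1 : String) (s2 : String) (out : Int) : Decidable (Spec_deletion_distance s1 s2 out) := by unfold Spec_deletion_distance; infer_instance

-- ===== CLAIM =====
def Claim_equal_deletion_distance : Prop := ∀ (s1 : String) (s2 : String), Dom_deletion_distance s1 s2 → Spec_deletion_distance s1 s2 (deletion_distance s1 s2)

-- ===== LEMMAS AND PROOFS =====

-- proof-side recursion equal to B's zip/fold row step (used only in the proofs)
def nextRowB (c : Char) : Int → List Int → List Char → List Int
  | left, pd :: up :: rest, c2 :: cs =>
      let v := if c = c2 then pd + 1 else max up left
      v :: nextRowB c v (up :: rest) cs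
  | _, _, _ => []

def rowsB : List Int → List Char → List Char → List Int
  | prev, [], _ => prev
  | prev, c :: cs, t => rowsB (0 :: nextRowB c 0 prev t) cs t

theorem foldl_inner_eq : ∀ (t : List Char) (prev : List Int) (c : Char) (v : Int) (rest : List Int),
    (t.zip (prev.zip prev.tail)).foldl
      (fun cur p => (if c = p.1 then p.2.1 + 1 else max p.2.2 (cur.headD 0)) :: cur)
      (v :: rest)
    = (nextRowB c v prev t).reverse ++ v :: rest := by
  intro t
  induction t with
  | nil => intro prev c v rest; simp [nextRowB]
  | cons c2 cs ih =>
      intro prev c v rest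
      match prev with
      | [] => simp [nextRowB]
      | [pd] => simp [nextRowB]
      | pd :: up :: r =>
          simp only [List.tail_cons, List.zip_cons_cons, List.foldl_cons, List.headD_cons,
            nextRowB]
          have h := ih (up :: r) c (if c = c2 then pd + 1 else max up v) (v :: rest)
          simp only [List.tail_cons] at h
          rw [h]
          simp

theorem stepB_eq (c : Char) (t : List Char) (prev : List Int) :
    stepB c t prev = 0 :: nextRowB c 0 prev t := by
  unfold stepB
  rw [foldl_inner_eq t prev c 0 []]
  simp

theorem foldl_stepB_eq : ∀ (cs t : List Char) (prev : List Int),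
    cs.foldl (fun prev c => stepB c t prev) prev = rowsB prev cs t := by
  intro cs
  induction cs with
  | nil => intro t prev; simp [rowsB]
  | cons c cs ih =>
      intro t prev
      simp only [List.foldl_cons, rowsB]
      rw [stepB_eq]
      exact ih t _

-- a row of A's table as an affine image of B's row: entry k ↦ (o + k) - 2 * b_k
def omap : Int → List Int → List Int
  | _, [] => []
  | o, b :: bs => (o - 2 * b) :: omap (o + 1) bs

theorem omap_congr (o o' : Int) (l : List Int) (h : o = o') : omap o l = omap o' l := by rw [h]

-- adjacent entries of an LCS row step by 0 or 1
def Adj : List Int → Prop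
  | a :: b :: rest => a ≤ b ∧ b ≤ a + 1 ∧ Adj (b :: rest)
  | _ => True

def lbBound : List Int → Int → Prop
  | pd :: _, lb => pd ≤ lb ∧ lb ≤ pd + 1
  | [], _ => True

theorem nextRowB_bounds : ∀ (cs : List Char) (c : Char) (lb : Int) (prev : List Int),
    Adj prev → lbBound prev lb → Adj (lb :: nextRowB c lb prev cs) := by
  intro cs
  induction cs with
  | nil =>
      intro c lb prev _ _
      cases prev with
      | nil => simp [nextRowB, Adj]
      | cons pd rest => cases rest <;> simp [nextRowB, Adj]
  | cons c2 cs ih =>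
      intro c lb prev hAdj hlb
      match prev with
      | [] => simp [nextRowB, Adj]
      | [pd] => simp [nextRowB, Adj]
      | pd :: up :: rest =>
        obtain ⟨h1, h2, h3⟩ := hAdj
        obtain ⟨hl1, hl2⟩ := hlb
        simp only [nextRowB]
        set v : Int := if c = c2 then pd + 1 else max up lb with hv
        have hvb : lb ≤ v ∧ v ≤ lb + 1 := by
          rw [hv]; split <;> constructor <;> omega
        have := ih c v (up :: rest) h3 (by constructor <;> [skip; skip] <;> (rw [hv]; split <;> omega))
        exact ⟨hvb.1, hvb.2, this⟩

theorem stepEq : ∀ (cs : List Char) (c : Char) (o lb : Int) (prev : List Int),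
    Adj prev → lbBound prev lb →
    nextRowA c (o + 1 - 2 * lb) (omap o prev) cs = omap (o + 2) (nextRowB c lb prev cs) := by
  intro cs
  induction cs with
  | nil =>
      intro c o lb prev _ _
      cases prev with
      | nil => simp [nextRowA, nextRowB, omap]
      | cons pd rest => cases rest <;> simp [nextRowA, nextRowB, omap]
  | cons c2 cs ih =>
      intro c o lb prev hAdj hlb
      match prev with
      | [] => simp [nextRowA, nextRowB, omap]
      | [pd] => simp [nextRowA, nextRowB, omap]
      | pd :: up :: rest =>
        obtain ⟨h1, h2, h3⟩ := hAdj
        obtain ⟨hl1, hl2⟩ := hlb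
        simp only [omap, nextRowA, nextRowB]
        set vB : Int := if c = c2 then pd + 1 else max up lb with hvB
        have hvA : (if c = c2 then o - 2 * pd
            else min (2 + (o - 2 * pd)) (min (1 + (o + 1 - 2 * up)) (1 + (o + 1 - 2 * lb))))
            = o + 2 - 2 * vB := by
          rw [hvB]; split <;> omega
        have hbnd : up ≤ vB ∧ vB ≤ up + 1 := by rw [hvB]; split <;> constructor <;> omega
        have key := ih c (o + 1) vB (up :: rest) h3 hbnd
        rw [hvA]
        have e0 : (o + 1 + 1 : Int) - 2 * vB = o + 2 - 2 * vB := by ring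
        rw [e0] at key
        have homap : (o + 1 - 2 * up) :: omap (o + 1 + 1) rest = omap (o + 1) (up :: rest) := by
          simp only [omap]
        rw [homap, key, omap_congr (o + 1 + 2) (o + 2 + 1) _ (by ring)]

theorem head0_of_cons : ∀ (prev : List Int), prev.head? = some 0 → lbBound prev 0 := by
  intro prev h
  cases prev with
  | nil => simp at h
  | cons a l => simp at h; simp [lbBound, h]

theorem rowsEq : ∀ (cs t : List Char) (i : Int) (prevB : List Int),
    Adj prevB → prevB.head? = some 0 →
    rowsA (omap i prevB) i cs t = omap (i + cs.length) (rowsB prevB cs t) := by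
  intro cs
  induction cs with
  | nil => intro t i prevB _ _; simp [rowsA, rowsB]
  | cons c cs ih =>
      intro t i prevB hAdj hhead
      have hlb := head0_of_cons prevB hhead
      have hstep := stepEq t c i 0 prevB hAdj hlb
      have h1 : (i + 1 : Int) - 2 * 0 = i + 1 := by ring
      rw [h1] at hstep
      simp only [rowsA, rowsB]
      have hrow : (i + 1) :: nextRowA c (i + 1) (omap i prevB) t
          = omap (i + 1) (0 :: nextRowB c 0 prevB t) := by
        simp only [omap, mul_zero, sub_zero]
        rw [hstep, omap_congr (i + 2) (i + 1 + 1) _ (by ring)]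
      rw [hrow]
      have hAdj' : Adj (0 :: nextRowB c 0 prevB t) := nextRowB_bounds t c 0 prevB hAdj hlb
      rw [ih t (i + 1) (0 :: nextRowB c 0 prevB t) hAdj' (by simp)]
      apply omap_congr
      simp only [List.length_cons]
      push_cast
      ring

theorem adj_replicate : ∀ (k : Nat), Adj (List.replicate k (0 : Int)) := by
  intro k
  induction k with
  | zero => trivial
  | succ n ih =>
      cases n with
      | zero => simp [Adj, List.replicate]
      | succ n' =>
          simp only [List.replicate] at *
          exact ⟨le_refl 0, by omega, ih⟩

theorem omap_replicate : ∀ (k : Nat) (o : Int),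
    omap o (List.replicate k 0) = (List.range k).map (fun j : Nat => o + (j : Int)) := by
  intro k
  induction k with
  | zero => intro o; simp [omap]
  | succ n ih =>
      intro o
      rw [List.replicate_succ, List.range_succ_eq_map]
      simp only [omap, List.map_cons, mul_zero, sub_zero, List.map_map, ih (o + 1)]
      refine congrArg₂ List.cons (by simp) ?_
      apply List.map_congr_left
      intro j _
      simp only [Function.comp_apply]
      push_cast
      ring

theorem getLastD_omap : ∀ (l : List Int) (o : Int), l ≠ [] →
    (omap o l).getLastD 0 = o + l.length - 1 - 2 * l.getLastD 0 := by
  intro l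
  induction l with
  | nil => intro o h; exact absurd rfl h
  | cons a rest ih =>
      intro o _
      cases rest with
      | nil => simp [omap]
      | cons b r =>
          have hih := ih (o + 1) (by simp)
          simp only [omap, List.getLastD_cons] at hih ⊢
          rw [hih]
          simp only [List.length_cons]
          push_cast
          ring

theorem nextRowB_length : ∀ (cs : List Char) (c : Char) (lb : Int) (prev : List Int),
    (nextRowB c lb prev cs).length = min (prev.length - 1) cs.length := by
  intro cs
  induction cs with
  | nil =>
      intro c lb prev
      cases prev with
      | nil => simp [nextRowB]
      | cons a r => cases r <;> simp [nextRowB]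
  | cons c2 cs ih =>
      intro c lb prev
      match prev with
      | [] => simp [nextRowB]
      | [a] => simp [nextRowB]
      | a :: b :: r =>
          simp only [nextRowB, List.length_cons]
          rw [ih]
          simp

theorem rowsB_length : ∀ (cs t : List Char) (prev : List Int),
    prev.length = t.length + 1 → (rowsB prev cs t).length = t.length + 1 := by
  intro cs
  induction cs with
  | nil => intro t prev h; simpa [rowsB] using h
  | cons c cs ih =>
      intro t prev h
      simp only [rowsB]
      apply ih
      simp [nextRowB_length, h]

theorem getLastD_replicate_zero : ∀ (k : Nat), (List.replicate k (0 : Int)).getLastD 0 = 0 := by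
  intro k
  induction k with
  | zero => rfl
  | succ n ih =>
      rw [List.replicate_succ]
      cases n with
      | zero => rfl
      | succ n' => rw [List.getLastD_cons]; exact ih

theorem rowsB_nil_singleton : ∀ (cs : List Char), rowsB [0] cs [] = [0] := by
  intro cs
  induction cs with
  | nil => rfl
  | cons c cs ih => simpa [rowsB, nextRowB] using ih

-- ===== VERDICT =====
theorem deletion_distance_spec : Claim_equal_deletion_distance := by
  unfold Claim_equal_deletion_distance
  intro s1 s2 _
  unfold Spec_deletion_distance deletion_distance deletion_distance_alt
  simp only [foldl_stepB_eq]
  by_cases h1 : s1.toList.length = 0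
  · -- n = 0: A returns m; B's table is the untouched zero row
    have hs1 : s1.toList = [] := List.eq_nil_of_length_eq_zero h1
    rw [hs1]
    simp only [rowsB, List.length_nil, Nat.cast_zero, getLastD_replicate_zero, mul_zero,
      sub_zero, zero_add]
    simp
  · by_cases h2 : s2.toList.length = 0
    · -- m = 0: A returns n; B's rows collapse to [0]
      have hs2 : s2.toList = [] := List.eq_nil_of_length_eq_zero h2
      obtain ⟨c, cs, hcs⟩ : ∃ c cs, s1.toList = c :: cs := by
        cases hl : s1.toList with
        | nil => exact absurd (by simp [hl]) h1
        | cons a l => exact ⟨a, l, rfl⟩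
      have hn : (s1.toList.length : Int) ≠ 0 := by exact_mod_cast h1
      simp [hs2, hcs, rowsB_nil_singleton, List.replicate]
      intro h
      omega
    · -- main case
      have hn : (s1.toList.length : Int) ≠ 0 := by exact_mod_cast h1
      have hm : (s2.toList.length : Int) ≠ 0 := by exact_mod_cast h2
      rw [if_neg hn, if_neg hm]
      have hinit : (List.range (s2.toList.length + 1)).map Int.ofNat
          = omap 0 (List.replicate (s2.toList.length + 1) 0) := by
        rw [omap_replicate]
        apply List.map_congr_left
        intro j _
        simp
      have hhead : (List.replicate (s2.toList.length + 1) (0 : Int)).head? = some 0 := by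
        simp [List.replicate_succ]
      have hrows := rowsEq s1.toList s2.toList 0 (List.replicate (s2.toList.length + 1) 0)
        (adj_replicate _) hhead
      rw [hinit, hrows]
      have hlen : (rowsB (List.replicate (s2.toList.length + 1) 0) s1.toList s2.toList).length
          = s2.toList.length + 1 := rowsB_length _ _ _ (by simp)
      have hne : rowsB (List.replicate (s2.toList.length + 1) 0) s1.toList s2.toList ≠ [] := by
        intro h; rw [h] at hlen; simp at hlen
      rw [getLastD_omap _ _ hne, hlen]
      push_cast
      ring
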